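-- pv_equiv track=rewrite | github.com/slidracoon72/leetcode | OAs/uber_practise.py | command_frequency_counter
-- ===== SOURCE A (Python) =====
-- def command_frequency_counter(commands):
--     """
--     Counts the frequency of cmd1, cmd2, and cmd3 in the given command list.
--
--     Args:
--     commands (list): A list of commands containing cmd1, cmd2, cmd3, and references in the form of !<index>.
--
--     Returns:
--     list: A list of frequencies of cmd1, cmd2, and cmd3 in the order [freq of cmd1, freq of cmd2, freq of cmd3].
--     """
--     # Initialize counters for cmd1, cmd2, cmd3
--     counts = [0, 0, 0]
--
--     for i in range(len(commands)):
--         # Check if the command is a reference like !<index>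
--         if commands[i][0] == '!':
--             # Convert 1-based index in !<index> to 0-based index
--             ref_index = int(commands[i][1:]) - 1
--             # Replace the reference with the actual command
--             commands[i] = commands[ref_index]
--
--         # Increment the respective counter based on the command
--         if commands[i] == "cmd1":
--             counts[0] += 1
--         elif commands[i] == "cmd2":
--             counts[1] += 1
--         elif commands[i] == "cmd3":
--             counts[2] += 1
--
--     return counts
-- ===== SOURCE B (Python) =====
-- def command_frequency_counter(commands):
--     # Pass 1: resolve every !<index> reference in place (same mutation as A).
--     for i, c in enumerate(commands):
--         if c[0] == '!':
--             commands[i] = commands[int(c[1:]) - 1]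
--     # Pass 2: count the now-resolved commands with list.count.
--     return [commands.count("cmd1"), commands.count("cmd2"), commands.count("cmd3")]
-- ===== Notes on version B (the rewrite author's own statement) =====
-- stated objective: simpler
-- what changed: A's single fused loop that resolves references and maintains a three-counter array with if/elif chains becomes a resolve-only pass (same in-place mutation) followed by counting the resolved list with list.count.
import Mathlib
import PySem

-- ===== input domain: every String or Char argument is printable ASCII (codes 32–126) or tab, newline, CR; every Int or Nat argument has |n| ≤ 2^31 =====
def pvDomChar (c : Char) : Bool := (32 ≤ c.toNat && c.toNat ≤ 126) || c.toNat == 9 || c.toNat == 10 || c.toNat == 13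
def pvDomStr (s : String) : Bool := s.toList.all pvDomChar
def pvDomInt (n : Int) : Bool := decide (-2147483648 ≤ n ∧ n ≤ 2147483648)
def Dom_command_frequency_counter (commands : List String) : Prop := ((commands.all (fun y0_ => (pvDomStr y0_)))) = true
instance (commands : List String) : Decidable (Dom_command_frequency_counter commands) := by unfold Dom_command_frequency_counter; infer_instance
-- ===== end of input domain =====

-- B replaces A's single fused resolve-and-count loop (three-counter array updated by an if/elif chain)
-- with a resolve-only pass performing the same in-place mutation, followed by counting the resolved
-- list with list.count; equivalence is about the return value (both mutate `commands` identically).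

-- ===== PORT A =====
def command_frequency_counter (commands : List String) : List Int :=
  (((List.range commands.length).foldl
    (fun (st : List String × List Int) i =>
      let cmds :=
        if PySem.Str.pyGet? (st.1.getD i "") 0 = some '!' then
          let refIndex :=
            (PySem.Int.ofStr? (PySem.Str.slice (st.1.getD i "") (some 1) none)).getD 0 - 1
          PySem.List.pySetD st.1 (i : Int) ((PySem.List.pyGet? st.1 refIndex).getD "")
        else st.1
      let counts :=
        if cmds.getD i "" = "cmd1" then st.2.modify 0 (· + 1)
        else if cmds.getD i "" = "cmd2" then st.2.modify 1 (· + 1)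
        else if cmds.getD i "" = "cmd3" then st.2.modify 2 (· + 1)
        else st.2
      (cmds, counts))
    (commands, ([0, 0, 0] : List Int)))).2

-- ===== PORT B =====
def command_frequency_counter_alt (commands : List String) : List Int :=
  let resolved :=
    (PySem.List.enumerate commands).foldl
      (fun cmds p =>
        if PySem.Str.pyGet? p.2 0 = some '!' then
          PySem.List.pySetD cmds p.1
            ((PySem.List.pyGet? cmds
              ((PySem.Int.ofStr? (PySem.Str.slice p.2 (some 1) none)).getD 0 - 1)).getD "")
        else cmds)
      commands
  [(PySem.List.count resolved "cmd1" : Int),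
   (PySem.List.count resolved "cmd2" : Int),
   (PySem.List.count resolved "cmd3" : Int)]

-- ===== PRECONDITION & SPEC =====
-- Pre_ excludes exactly the inputs on which Python A raises: an empty command string (IndexError at
-- commands[i][0]), a '!'-command whose tail is not an int literal (ValueError at int), and a
-- '!'-command whose resolved index is out of Python's (sign-wrapping) range (IndexError).
def Pre_command_frequency_counter (commands : List String) : Prop :=
  ∀ c ∈ commands, c ≠ "" ∧
    (PySem.Str.pyGet? c 0 = some '!' →
      (PySem.Int.ofStr? (PySem.Str.slice c (some 1) none)).isSome = true ∧
      PySem.Raise.InRange commands.length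
        ((PySem.Int.ofStr? (PySem.Str.slice c (some 1) none)).getD 0 - 1))
instance (commands : List String) : Decidable (Pre_command_frequency_counter commands) := by
  unfold Pre_command_frequency_counter; infer_instance
def pvWitness_command_frequency_counter : List String := ["cmd1", "!1", "cmd2", "!2"]
def Spec_command_frequency_counter (commands : List String) (out : List Int) : Prop := out = command_frequency_counter_alt commands
instance (commands : List String) (out : List Int) : Decidable (Spec_command_frequency_counter commands out) := by unfold Spec_command_frequency_counter; infer_instance

-- ===== CLAIM (what is proved, stated in full; the proofs are below) =====
def Claim_equal_command_frequency_counter : Prop := ∀ (commands : List String), Dom_command_frequency_counter commands → Pre_command_frequency_counter commands → Spec_command_frequency_counter commands (command_frequency_counter commands)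

-- ===== LEMMAS AND PROOFS =====

-- B's loop body (the reference-resolution step), named for the proofs.
def bstep (cmds : List String) (p : Int × String) : List String :=
  if PySem.Str.pyGet? p.2 0 = some '!' then
    PySem.List.pySetD cmds p.1
      ((PySem.List.pyGet? cmds
        ((PySem.Int.ofStr? (PySem.Str.slice p.2 (some 1) none)).getD 0 - 1)).getD "")
  else cmds

-- A's loop body, named for the proofs.
def stepA (st : List String × List Int) (i : Nat) : List String × List Int :=
  let cmds := bstep st.1 ((i : Int), st.1.getD i "")
  let counts :=
    if cmds.getD i "" = "cmd1" then st.2.modify 0 (· + 1)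
    else if cmds.getD i "" = "cmd2" then st.2.modify 1 (· + 1)
    else if cmds.getD i "" = "cmd3" then st.2.modify 2 (· + 1)
    else st.2
  (cmds, counts)

theorem bstep_natCast (cmds : List String) (i : Nat) (c : String) :
    ∃ v, bstep cmds ((i : Int), c) = cmds.set i v ∨ bstep cmds ((i : Int), c) = cmds := by
  by_cases h : PySem.Str.pyGet? c 0 = some '!'
  · refine ⟨(PySem.List.pyGet? cmds
      ((PySem.Int.ofStr? (PySem.Str.slice c (some 1) none)).getD 0 - 1)).getD "", Or.inl ?_⟩
    unfold bstep
    rw [if_pos h, PySem.List.pySetD_natCast]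
  · refine ⟨"", Or.inr ?_⟩
    unfold bstep
    rw [if_neg h]

theorem length_bstep (cmds : List String) (i : Nat) (c : String) :
    (bstep cmds ((i : Int), c)).length = cmds.length := by
  obtain ⟨v, h | h⟩ := bstep_natCast cmds i c <;> simp [h]

theorem getD_bstep_ne (cmds : List String) (i : Nat) (c : String) (j : Nat) (hj : j ≠ i) :
    (bstep cmds ((i : Int), c)).getD j "" = cmds.getD j "" := by
  obtain ⟨v, h | h⟩ := bstep_natCast cmds i c <;> rw [h]
  simp [List.getD_eq_getElem?_getD, List.getElem?_set_ne (Ne.symm hj)]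

theorem drop_bstep (cmds : List String) (i : Nat) (c : String) :
    (bstep cmds ((i : Int), c)).drop (i + 1) = cmds.drop (i + 1) := by
  obtain ⟨v, h | h⟩ := bstep_natCast cmds i c <;> rw [h]
  exact List.drop_set_of_lt (by omega)

-- The resolved list: apply the resolution step at positions i, i+1, …, end.
def resolveAux (cmds : List String) (i : Nat) : List String :=
  if h : i < cmds.length then
    resolveAux (bstep cmds ((i : Int), cmds.getD i "")) (i + 1)
  else cmds
termination_by cmds.length - i
decreasing_by simp [length_bstep]; omega

theorem length_resolveAux (cmds : List String) (i : Nat) :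
    (resolveAux cmds i).length = cmds.length := by
  induction cmds, i using resolveAux.induct with
  | case1 cmds i h ih => rw [resolveAux, dif_pos h, ih, length_bstep]
  | case2 cmds i h => rw [resolveAux, dif_neg h]

theorem getD_resolveAux_lt (cmds : List String) (i j : Nat) (hj : j < i) :
    (resolveAux cmds i).getD j "" = cmds.getD j "" := by
  induction cmds, i using resolveAux.induct generalizing j with
  | case1 cmds i h ih =>
      rw [resolveAux, dif_pos h, ih j (by omega), getD_bstep_ne _ _ _ _ (by omega)]
  | case2 cmds i h => rw [resolveAux, dif_neg h]

-- B's fold over enumerate computes resolveAux.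
theorem foldl_bstep_enumerate : ∀ (suf : List String) (i : Nat) (cmds : List String),
    cmds.length = i + suf.length → cmds.drop i = suf →
    (PySem.List.enumerate suf (i : Int)).foldl bstep cmds = resolveAux cmds i := by
  intro suf
  induction suf with
  | nil =>
      intro i cmds hlen _
      simp only [List.length_nil] at hlen
      rw [PySem.List.enumerate_nil, List.foldl_nil, resolveAux, dif_neg (by omega)]
  | cons x suf ih =>
      intro i cmds hlen hdrop
      simp only [List.length_cons] at hlen
      have hi : i < cmds.length := by omega
      have h0 : cmds[i]? = some x := by
        have hgd : (cmds.drop i)[0]? = cmds[i + 0]? := List.getElem?_drop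
        rw [hdrop] at hgd
        simpa using hgd.symm
      have hx : cmds.getD i "" = x := by rw [List.getD_eq_getElem?_getD, h0]; rfl
      rw [PySem.List.enumerate_cons, List.foldl_cons, resolveAux, dif_pos hi, hx]
      have hcast : (i : Int) + 1 = ((i + 1 : Nat) : Int) := by push_cast; ring
      rw [hcast]
      apply ih
      · rw [length_bstep]; simp only [hlen]; omega
      · rw [drop_bstep]
        have ht : cmds.drop (i + 1) = (cmds.drop i).tail := by rw [List.tail_drop]
        rw [ht, hdrop]
        rfl

theorem portB_eq (commands : List String) :
    command_frequency_counter_alt commands =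
      [((resolveAux commands 0).count "cmd1" : Int),
       ((resolveAux commands 0).count "cmd2" : Int),
       ((resolveAux commands 0).count "cmd3" : Int)] := by
  have hb := foldl_bstep_enumerate commands 0 commands (by simp) (by simp)
  simp only [Nat.cast_zero] at hb
  show [(PySem.List.count ((PySem.List.enumerate commands).foldl bstep commands) "cmd1" : Int),
        (PySem.List.count ((PySem.List.enumerate commands).foldl bstep commands) "cmd2" : Int),
        (PySem.List.count ((PySem.List.enumerate commands).foldl bstep commands) "cmd3" : Int)] = _
  rw [hb]
  simp [PySem.List.count_eq]

-- A's fold over range: the counters accumulate the counts of the resolved suffix.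
theorem foldl_stepA : ∀ (k i : Nat) (cmds : List String) (a b c : Int),
    i + k = cmds.length →
    (List.range' i k).foldl stepA (cmds, [a, b, c]) =
      (resolveAux cmds i,
       [a + (((resolveAux cmds i).drop i).count "cmd1" : Int),
        b + (((resolveAux cmds i).drop i).count "cmd2" : Int),
        c + (((resolveAux cmds i).drop i).count "cmd3" : Int)]) := by
  intro k
  induction k with
  | zero =>
      intro i cmds a b c hlen
      have hnil : cmds.drop i = [] := List.drop_eq_nil_of_le (by omega)
      rw [List.range'_zero, List.foldl_nil, resolveAux, dif_neg (by omega)]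
      simp [hnil]
  | succ k ih =>
      intro i cmds a b c hlen
      have hi : i < cmds.length := by omega
      set cmds' := bstep cmds ((i : Int), cmds.getD i "") with hc'
      have hres : resolveAux cmds i = resolveAux cmds' (i + 1) := by
        rw [resolveAux, dif_pos hi]
      have hlen' : (i + 1) + k = cmds'.length := by rw [hc', length_bstep]; omega
      have hfinlen : (resolveAux cmds' (i + 1)).length = cmds.length := by
        rw [length_resolveAux, hc', length_bstep]
      set v := cmds'.getD i "" with hv
      have hfv : (resolveAux cmds' (i + 1)).getD i "" = v := getD_resolveAux_lt _ _ _ (by omega)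
      have hdropcons : (resolveAux cmds' (i + 1)).drop i =
          v :: (resolveAux cmds' (i + 1)).drop (i + 1) := by
        rw [List.drop_eq_getElem_cons (by omega)]
        congr 1
        rw [← hfv, List.getD_eq_getElem?_getD, List.getElem?_eq_getElem (by omega)]
        rfl
      have hstep : stepA (cmds, [a, b, c]) i =
          (cmds', if v = "cmd1" then [a + 1, b, c]
                  else if v = "cmd2" then [a, b + 1, c]
                  else if v = "cmd3" then [a, b, c + 1]
                  else [a, b, c]) := by
        unfold stepA
        simp only [← hc', ← hv]
        split_ifs <;> rfl
      rw [List.range'_succ, List.foldl_cons, hstep, hres]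
      by_cases h1 : v = "cmd1"
      · rw [if_pos h1, ih (i + 1) cmds' (a + 1) b c hlen']
        refine Prod.ext rfl ?_
        rw [hdropcons]
        have e1 : (v == "cmd1") = true := by rw [h1]; decide
        have e2 : (v == "cmd2") = false := by rw [h1]; decide
        have e3 : (v == "cmd3") = false := by rw [h1]; decide
        simp only [List.count_cons, e1, e2, e3, if_true, List.cons.injEq, and_true]
        push_cast
        omega
      rw [if_neg h1]
      by_cases h2 : v = "cmd2"
      · rw [if_pos h2, ih (i + 1) cmds' a (b + 1) c hlen']
        refine Prod.ext rfl ?_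
        rw [hdropcons]
        have e1 : (v == "cmd1") = false := by rw [h2]; decide
        have e2 : (v == "cmd2") = true := by rw [h2]; decide
        have e3 : (v == "cmd3") = false := by rw [h2]; decide
        simp only [List.count_cons, e1, e2, e3, if_true, List.cons.injEq, and_true]
        push_cast
        omega
      rw [if_neg h2]
      by_cases h3 : v = "cmd3"
      · rw [if_pos h3, ih (i + 1) cmds' a b (c + 1) hlen']
        refine Prod.ext rfl ?_
        rw [hdropcons]
        have e1 : (v == "cmd1") = false := by rw [h3]; decide
        have e2 : (v == "cmd2") = false := by rw [h3]; decide
        have e3 : (v == "cmd3") = true := by rw [h3]; decide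
        simp only [List.count_cons, e1, e2, e3, if_true, List.cons.injEq, and_true]
        push_cast
        omega
      rw [if_neg h3, ih (i + 1) cmds' a b c hlen']
      refine Prod.ext rfl ?_
      rw [hdropcons]
      have e1 : (v == "cmd1") = false := by simp; exact h1
      have e2 : (v == "cmd2") = false := by simp; exact h2
      have e3 : (v == "cmd3") = false := by simp; exact h3
      simp only [List.count_cons, e1, e2, e3, List.cons.injEq, and_true]
      push_cast
      omega

theorem portA_eq (commands : List String) :
    command_frequency_counter commands =
      [((resolveAux commands 0).count "cmd1" : Int),
       ((resolveAux commands 0).count "cmd2" : Int),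
       ((resolveAux commands 0).count "cmd3" : Int)] := by
  show ((List.range commands.length).foldl stepA (commands, ([0,0,0] : List Int))).2 = _
  rw [List.range_eq_range', foldl_stepA commands.length 0 commands 0 0 0 (by omega)]
  simp

-- ===== VERDICT (by name: the statement is the Claim_ definition above) =====
theorem command_frequency_counter_spec : Claim_equal_command_frequency_counter := by
  intro commands _ _
  unfold Spec_command_frequency_counter
  rw [portA_eq, portB_eq]
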